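-- pv_equiv track=rewrite | github.com/manjaro/pacman-mirrors | pacman_mirrors/consolefn.py | rows_from_tuple
-- ===== SOURCE A (Python) =====
-- def rows_from_tuple(servers, joiner=" | "):
--     """
--     Generates equal formatted lines
--     :param servers: named tuples
--     :param joiner: string used to join tuple items
--     :return lines: list of nicely formatted lines
--     """
--     rows = []
--     if servers:
--         # calculate max col width
--         col_width = [max(len(text) for text in col) for col in zip(*servers)]
--
--         # generate lines
--         for line in servers:
--             rows.append(joiner.join("{:{}}".format(text, col_width[i])
--                                     for i, text in enumerate(line)))
--     return rows
-- ===== SOURCE B (Python) =====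
-- def rows_from_tuple(servers, joiner=" | "):
--     """Column-major re-implementation: pad each column once, then reassemble rows."""
--     if not servers:
--         return []
--     padded = [[text.ljust(max(len(t) for t in col)) for text in col]
--               for col in zip(*servers)]
--     return [joiner.join(col[i] for col in padded) for i in range(len(servers))]
-- ===== Notes on version B (the rewrite author's own statement) =====
-- stated objective: alternative
-- what changed: Row-major generation (enumerate each row and look up its column width per cell) is replaced by a column-major pass that pads each whole column once and then reassembles rows by index.
import Mathlib
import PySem

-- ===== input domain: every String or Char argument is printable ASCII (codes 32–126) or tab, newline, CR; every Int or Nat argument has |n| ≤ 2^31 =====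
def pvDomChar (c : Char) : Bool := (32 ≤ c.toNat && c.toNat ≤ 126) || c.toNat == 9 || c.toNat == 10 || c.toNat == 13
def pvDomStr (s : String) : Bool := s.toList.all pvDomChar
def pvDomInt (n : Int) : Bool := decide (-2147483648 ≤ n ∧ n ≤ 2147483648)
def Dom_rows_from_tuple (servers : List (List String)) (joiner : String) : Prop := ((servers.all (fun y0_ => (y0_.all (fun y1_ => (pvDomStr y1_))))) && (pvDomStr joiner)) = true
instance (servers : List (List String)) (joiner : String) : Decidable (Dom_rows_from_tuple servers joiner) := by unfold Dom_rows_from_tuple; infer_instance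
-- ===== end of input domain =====

-- B pads each whole column once (column-major) instead of A's per-cell width lookup while
-- enumerating each row; same cost, different decomposition.


-- ===== PORT A =====
-- zip(*rows): truncates to the shortest row; exact since every index j < every row length,
-- so the getD default is never used.
def pvZipStar (rows : List (List String)) : List (List String) :=
  let m := ((rows.map List.length).min?).getD 0
  (List.range m).map (fun j => rows.map (fun r => r.getD j ""))

-- max(len(text) for text in col): exact for nonempty col of Nat lengths (fold from 0).
def pvMaxWidth (col : List String) : Nat :=
  (col.map (fun t => t.toList.length)).foldl Nat.max 0

-- "{:{w}}".format(text, w) on a str left-justifies with spaces; exact (hand port).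
def pvPad (t : String) (w : Nat) : String :=
  String.mk (t.toList ++ List.replicate (w - t.toList.length) ' ')

def rows_from_tuple (servers : List (List String)) (joiner : String) : List String :=
  if servers = [] then []
  else
    let colWidth := (pvZipStar servers).map pvMaxWidth
    servers.map (fun line =>
      PySem.Str.join joiner
        ((PySem.List.enumerate line 0).map
          (fun p => pvPad p.2 (PySem.List.pyGetD colWidth p.1 0))))

-- ===== PORT B =====
def rows_from_tuple_alt (servers : List (List String)) (joiner : String) : List String :=
  if servers = [] then []
  else
    let padded := (pvZipStar servers).map
      (fun col => col.map (fun text => pvPad text (pvMaxWidth col)))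
    (List.range servers.length).map (fun i =>
      PySem.Str.join joiner (padded.map (fun col => col.getD i "")))

-- ===== PRECONDITION & SPEC =====
-- Pre_ excludes exactly the ragged inputs: there A's col_width[i] lookup raises IndexError.
def Pre_rows_from_tuple (servers : List (List String)) (joiner : String) : Prop :=
  ∀ r ∈ servers, r.length = (servers.headD []).length
instance (servers : List (List String)) (joiner : String) : Decidable (Pre_rows_from_tuple servers joiner) := by unfold Pre_rows_from_tuple; infer_instance

def pvWitness_rows_from_tuple : List (List String) × String := ([["a", "bb"], ["cc", "d"]], " | ")

def Spec_rows_from_tuple (servers : List (List String)) (joiner : String) (out : List String) : Prop := out = rows_from_tuple_alt servers joiner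
instance (servers : List (List String)) (joiner : String) (out : List String) : Decidable (Spec_rows_from_tuple servers joiner out) := by unfold Spec_rows_from_tuple; infer_instance

-- ===== CLAIM (what is proved, stated in full; the proofs are below) =====
def Claim_equal_rows_from_tuple : Prop := ∀ (servers : List (List String)) (joiner : String), Dom_rows_from_tuple servers joiner → Pre_rows_from_tuple servers joiner → Spec_rows_from_tuple servers joiner (rows_from_tuple servers joiner)

-- ===== LEMMAS AND PROOFS =====

lemma foldl_min_const (t : List Nat) (L : Nat) (h : ∀ x ∈ t, x = L) :
    t.foldl Nat.min L = L := by
  induction t with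
  | nil => rfl
  | cons a t ih =>
    have ha : a = L := h a (by simp)
    subst ha
    simpa using ih (fun x hx => h x (by simp [hx]))

lemma min?_const_of_all (l : List Nat) (L : Nat) (hne : l ≠ [])
    (h : ∀ x ∈ l, x = L) : l.min? = some L := by
  cases l with
  | nil => exact absurd rfl hne
  | cons a t =>
    rw [List.min?_cons']
    rw [show Min.min = Nat.min from rfl]
    rw [foldl_min_const t a (fun x hx => (h x (by simp [hx])).trans (h a (by simp)).symm)]
    exact congrArg some (h a (by simp))

theorem rows_from_tuple_spec : Claim_equal_rows_from_tuple := by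
  intro servers joiner _ hpre
  unfold Spec_rows_from_tuple rows_from_tuple rows_from_tuple_alt
  by_cases hne : servers = []
  · simp [hne]
  · simp only [if_neg hne]
    set L := (servers.headD []).length with hL
    have hlen : ∀ r ∈ servers, r.length = L := hpre
    have hmin : (servers.map List.length).min? = some L := by
      apply min?_const_of_all
      · simp [hne]
      · intro x hx
        rcases List.mem_map.1 hx with ⟨r, hr, rfl⟩
        exact hlen r hr
    have hzip : pvZipStar servers
        = (List.range L).map (fun j => servers.map (fun r => r.getD j "")) := by
      simp only [pvZipStar, hmin, Option.getD_some]
    rw [hzip]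
    apply List.ext_getElem
    · simp
    · intro i h1 h2
      simp only [List.getElem_map, List.getElem_range,
        List.length_map] at h1 h2 ⊢
      congr 1
      have hi : i < servers.length := by simpa using h1
      have hrowlen : servers[i].length = L := hlen servers[i] (List.getElem_mem hi)
      apply List.ext_getElem
      · simp [PySem.List.length_enumerate, hrowlen]
      · intro k hk1 hk2
        have hkL : k < L := by
          simpa [PySem.List.length_enumerate, hrowlen] using hk1
        simp only [List.getElem_map, List.getElem_range,
          PySem.List.getElem_enumerate, zero_add]
        -- left width lookup: colWidth[k]
        have hw : PySem.List.pyGetD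
            (((List.range L).map (fun j => servers.map (fun r => r.getD j ""))).map pvMaxWidth)
            (k : Int) 0
            = pvMaxWidth (servers.map (fun r => r.getD k "")) := by
          rw [PySem.List.pyGetD_natCast]
          rw [List.getD_eq_getElem?_getD]
          simp [hkL]
        rw [hw]
        -- right cell: padded column k at row i
        rw [List.getD_eq_getElem?_getD]
        have : i < ((servers.map (fun r => r.getD k "")).map
            (fun text => pvPad text (pvMaxWidth (servers.map (fun r => r.getD k ""))))).length := by
          simpa using hi
        simp only [List.getElem?_eq_getElem this, Option.getD_some, List.getElem_map]
        congr 1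
        rw [List.getD_eq_getElem?_getD]
        simp [hrowlen ▸ hkL]
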